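-- pv_equiv track=rewrite | github.com/miliar/Code_Jam_Webscraper | solutions_python/Problem_116/698.py | count_in_diagonal_1
-- ===== SOURCE A (Python) =====
-- def count_in_diagonal_1( board ):
--     X = 0
--     O = 0
--     T = 0
--     for r in range(4):
--         if board[r][r] == 'X':
--             X = X + 1
--         if board[r][r] == 'O':
--             O = O + 1
--         if board[r][r] == 'T':
--             T = T + 1
--     return (X, O, T)
-- ===== SOURCE B (Python) =====
-- def count_in_diagonal_1(board):
--     # Pack all three counts into one base-5 integer, then decode with divmod arithmetic.
--     weight = {'X': 1, 'O': 5, 'T': 25}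
--     packed = sum(weight.get(board[r][r], 0) for r in range(4))
--     return (packed % 5, packed // 5 % 5, packed // 25)
-- ===== Notes on version B (the rewrite author's own statement) =====
-- stated objective: alternative
-- what changed: B replaces A's three separate conditional counters with a single packed base-5 accumulator (weight table 1/5/25 per symbol, one sum over the diagonal) that is decoded into the three counts by modulus/division arithmetic at the end.
import Mathlib
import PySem

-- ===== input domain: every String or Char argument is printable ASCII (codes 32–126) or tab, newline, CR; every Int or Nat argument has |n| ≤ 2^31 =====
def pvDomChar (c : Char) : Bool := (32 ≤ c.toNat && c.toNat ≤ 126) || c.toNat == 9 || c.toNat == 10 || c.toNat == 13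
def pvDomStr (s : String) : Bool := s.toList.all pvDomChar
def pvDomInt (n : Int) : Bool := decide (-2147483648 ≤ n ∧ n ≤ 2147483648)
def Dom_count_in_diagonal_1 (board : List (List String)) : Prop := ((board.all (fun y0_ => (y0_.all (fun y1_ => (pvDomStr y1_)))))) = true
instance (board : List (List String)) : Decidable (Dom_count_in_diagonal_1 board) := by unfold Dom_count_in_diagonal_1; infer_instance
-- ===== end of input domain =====

-- B packs the three counts into one base-5 accumulator via a weight table and decodes them with % and // (alternative algorithm, same cost).
-- ===== PORT A =====
def count_in_diagonal_1 (board : List (List String)) : Int × Int × Int :=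
  let st := (PySem.List.pyRange 0 4 1).foldl (fun (s : Int × Int × Int) r =>
    let c := PySem.List.pyGetD (PySem.List.pyGetD board r []) r ""
    let s := if c == "X" then (s.1 + 1, s.2.1, s.2.2) else s
    let s := if c == "O" then (s.1, s.2.1 + 1, s.2.2) else s
    if c == "T" then (s.1, s.2.1, s.2.2 + 1) else s) (0, 0, 0)
  st

-- ===== PORT B =====
def count_in_diagonal_1_alt (board : List (List String)) : Int × Int × Int :=
  let weight : PySem.Dict String Int := PySem.Dict.ofList [("X", 1), ("O", 5), ("T", 25)]
  let packed := (PySem.List.pyRange 0 4 1).foldl (fun (acc : Int) r =>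
    acc + weight.getD (PySem.List.pyGetD (PySem.List.pyGetD board r []) r "") 0) 0
  (PySem.Int.mod packed 5, PySem.Int.mod (PySem.Int.floordiv packed 5) 5, PySem.Int.floordiv packed 25)

-- ===== PRECONDITION & SPEC =====
-- Pre_ excludes exactly the boards on which Python A raises IndexError: fewer than 4 rows, or a row r (r < 4) shorter than r+1.
def Pre_count_in_diagonal_1 (board : List (List String)) : Prop :=
  4 ≤ board.length ∧ 1 ≤ (board.getD 0 []).length ∧ 2 ≤ (board.getD 1 []).length ∧
  3 ≤ (board.getD 2 []).length ∧ 4 ≤ (board.getD 3 []).length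
instance (board : List (List String)) : Decidable (Pre_count_in_diagonal_1 board) := by unfold Pre_count_in_diagonal_1; infer_instance
def pvWitness_count_in_diagonal_1 : List (List String) :=
  [["X","a","b","c"],["d","O","e","f"],["g","h","T","i"],["j","k","l","X"]]

def Spec_count_in_diagonal_1 (board : List (List String)) (out : Int × Int × Int) : Prop := out = count_in_diagonal_1_alt board
instance (board : List (List String)) (out : Int × Int × Int) : Decidable (Spec_count_in_diagonal_1 board out) := by unfold Spec_count_in_diagonal_1; infer_instance

-- ===== CLAIM (what is proved, stated in full; the proofs are below) =====
def Claim_equal_count_in_diagonal_1 : Prop := ∀ (board : List (List String)), Dom_count_in_diagonal_1 board → Pre_count_in_diagonal_1 board → Spec_count_in_diagonal_1 board (count_in_diagonal_1 board)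

-- ===== LEMMAS AND PROOFS =====
-- A's fold, re-indexed through the list of diagonal cells, counts each symbol.
theorem foldl_xot (l : List String) (a b c : Int) :
    l.foldl (fun (s : Int × Int × Int) x =>
      let s := if x == "X" then (s.1 + 1, s.2.1, s.2.2) else s
      let s := if x == "O" then (s.1, s.2.1 + 1, s.2.2) else s
      if x == "T" then (s.1, s.2.1, s.2.2 + 1) else s) (a, b, c)
    = (a + l.count "X", b + l.count "O", c + l.count "T") := by
  induction l generalizing a b c with
  | nil => simp
  | cons x xs ih =>
    simp only [List.foldl_cons, List.count_cons, ih]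
    by_cases hX : x == "X" <;> by_cases hO : x == "O" <;> by_cases hT : x == "T" <;>
      simp_all <;> ring

-- the weight table, looked up pointwise
theorem wval (x : String) :
    (PySem.Dict.ofList [("X", (1:Int)), ("O", 5), ("T", 25)]).getD x 0
    = (if x == "X" then 1 else if x == "O" then 5 else if x == "T" then 25 else 0 : Int) := by
  have h : PySem.Dict.ofList [("X", (1:Int)), ("O", 5), ("T", 25)]
      = PySem.Dict.mk [("X", 1), ("O", 5), ("T", 25)] := by decide
  rw [h]
  simp only [PySem.Dict.getD, PySem.Dict.get?, List.find?]
  by_cases hX : x = "X"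
  · simp [hX]
  · by_cases hO : x = "O"
    · simp [hO]
    · by_cases hT : x = "T"
      · simp [hT]
      · have hbX : ("X" == x) = false := beq_eq_false_iff_ne.mpr (Ne.symm hX)
        have hbO : ("O" == x) = false := beq_eq_false_iff_ne.mpr (Ne.symm hO)
        have hbT : ("T" == x) = false := beq_eq_false_iff_ne.mpr (Ne.symm hT)
        simp [hbX, hbO, hbT, hX, hO, hT]

-- B's packed sum over a list of cells = count X + 5·count O + 25·count T
theorem foldl_packed (l : List String) (a : Int) :
    l.foldl (fun (acc : Int) x =>
      acc + (PySem.Dict.ofList [("X", (1:Int)), ("O", 5), ("T", 25)]).getD x 0) a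
    = a + l.count "X" + 5 * l.count "O" + 25 * l.count "T" := by
  induction l generalizing a with
  | nil => simp
  | cons x xs ih =>
    simp only [List.foldl_cons, List.count_cons]
    rw [wval, ih]
    by_cases hX : x == "X" <;> by_cases hO : x == "O" <;> by_cases hT : x == "T" <;>
      simp_all <;> ring

theorem count_in_diagonal_1_spec : Claim_equal_count_in_diagonal_1 := by
  intro board _ _
  unfold Spec_count_in_diagonal_1 count_in_diagonal_1 count_in_diagonal_1_alt
  set diag := (PySem.List.pyRange 0 4 1).map
    (fun r => PySem.List.pyGetD (PySem.List.pyGetD board r []) r "") with hdiag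
  have hA := foldl_xot diag 0 0 0
  have hB := foldl_packed diag 0
  rw [List.foldl_map] at hA hB
  simp only [hdiag] at hA hB
  simp only [hA, hB]
  -- bound the three counts by the diagonal's length (4)
  have hlen : diag.length = 4 := by simp [hdiag, PySem.List.pyRange]
  have hX := List.count_le_length (l := diag) (a := "X")
  have hO := List.count_le_length (l := diag) (a := "O")
  have hT := List.count_le_length (l := diag) (a := "T")
  rw [hlen] at hX hO hT
  simp only [hdiag] at hX hO hT
  have h5 : (0:Int) < 5 := by norm_num
  have h25 : (0:Int) < 25 := by norm_num
  rw [PySem.Int.mod_eq_emod_of_pos h5, PySem.Int.mod_eq_emod_of_pos h5,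
      PySem.Int.floordiv_eq_ediv_of_pos h5, PySem.Int.floordiv_eq_ediv_of_pos h25]
  simp only [zero_add]
  refine Prod.ext ?_ (Prod.ext ?_ ?_) <;> simp only [] <;> omega
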